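-- pv_equiv track=rewrite | github.com/cakemanny/pack-lang | interp.py | take_pairs
-- ===== SOURCE A (Python) =====
-- def take_pairs(xs):
--     "yield pairs from an even length iterable: ABCDEF -> AB CD EF"
--     i = 0
--     a = None
--     for x in xs:
--         if i == 0:
--             a = x
--             i = 1
--         else:
--             yield (a, x)
--             i = 0
--     if i != 0:
--         raise ValueError('odd length input')
-- ===== SOURCE B (Python) =====
-- def take_pairs(xs):
--     "yield pairs from an even length iterable: ABCDEF -> AB CD EF"
--     lst = list(xs)
--     if len(lst) % 2 != 0:
--         raise ValueError('odd length input')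
--     yield from zip(lst[::2], lst[1::2])
-- ===== Notes on version B (the rewrite author's own statement) =====
-- stated objective: idiomatic
-- what changed: Replaces A's one-pass parity state machine (i toggle + a buffer) with a staged materialise-then-slice approach: check parity up front, then zip the even-index slice lst[::2] with the odd-index slice lst[1::2].
import Mathlib
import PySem

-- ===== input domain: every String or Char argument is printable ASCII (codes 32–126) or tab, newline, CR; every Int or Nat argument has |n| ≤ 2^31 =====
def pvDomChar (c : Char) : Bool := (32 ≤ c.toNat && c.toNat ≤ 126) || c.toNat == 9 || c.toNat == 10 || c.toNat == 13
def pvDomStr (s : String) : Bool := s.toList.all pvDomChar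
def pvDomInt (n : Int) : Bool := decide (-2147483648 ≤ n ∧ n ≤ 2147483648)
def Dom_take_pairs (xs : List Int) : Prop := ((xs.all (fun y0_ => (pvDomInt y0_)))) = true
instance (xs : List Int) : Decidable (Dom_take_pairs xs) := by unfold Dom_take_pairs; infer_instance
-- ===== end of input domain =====

-- B replaces A's one-pass parity state machine with an up-front parity check followed by
-- zipping the even-index and odd-index slices (idiomatic); equality is about the yielded pairs.

-- ===== PORT A =====
-- for-loop with state i (toggle) and a (buffer, None initially); yields accumulate in order.
def take_pairs_go (rest : List Int) (i : Int) (a : Option Int) : List (Int × Int) :=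
  match rest with
  | [] => []
  | x :: rest' =>
      if i = 0 then take_pairs_go rest' 1 (some x)
      else (a.getD 0, x) :: take_pairs_go rest' 0 a
      -- 'a.getD 0': when i ≠ 0, a is always 'some'; Python yields (a, x)

def take_pairs (xs : List Int) : List (Int × Int) := take_pairs_go xs 0 none

-- ===== PORT B =====
-- lst[::2] (step-2 slice starting at index 0); PySem has no step slices, so it is ported by
-- hand and is exact: every second element of the list.
def stride2 : List Int → List Int
  | [] => []
  | [x] => [x]
  | x :: _ :: r => x :: stride2 r

def take_pairs_alt (xs : List Int) : List (Int × Int) :=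
  if xs.length % 2 ≠ 0 then []   -- Python B raises ValueError here (outside Pre_)
  else (stride2 xs).zip (stride2 xs.tail)   -- zip(lst[::2], lst[1::2])

-- ===== PRECONDITION & SPEC =====
-- A raises ValueError('odd length input') on odd-length xs (so does B); excluded.
def Pre_take_pairs (xs : List Int) : Prop := xs.length % 2 = 0
instance (xs : List Int) : Decidable (Pre_take_pairs xs) := by unfold Pre_take_pairs; infer_instance
def pvWitness_take_pairs : List Int := [1, 2, 3, 4]
def Spec_take_pairs (xs : List Int) (out : List (Int × Int)) : Prop := out = take_pairs_alt xs
instance (xs : List Int) (out : List (Int × Int)) : Decidable (Spec_take_pairs xs out) := by unfold Spec_take_pairs; infer_instance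

-- ===== CLAIM (what is proved, stated in full; the proofs are below) =====
def Claim_equal_take_pairs : Prop := ∀ (xs : List Int), Dom_take_pairs xs → Pre_take_pairs xs → Spec_take_pairs xs (take_pairs xs)

-- ===== LEMMAS AND PROOFS =====
lemma stride2_cons (x : Int) (r : List Int) : stride2 (x :: r) = x :: stride2 r.tail := by
  cases r <;> simp [stride2]

lemma go_eq_zip (xs : List Int) (a : Option Int) (h : xs.length % 2 = 0) :
    take_pairs_go xs 0 a = (stride2 xs).zip (stride2 xs.tail) := by
  induction xs using stride2.induct generalizing a with
  | case1 => simp [take_pairs_go, stride2]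
  | case2 x => simp at h
  | case3 x y r ih =>
      simp only [take_pairs_go, if_true, if_neg (by norm_num : ¬ (1 : Int) = 0),
        Option.getD_some, stride2, List.tail_cons, stride2_cons, List.zip_cons_cons]
      simp only [List.length_cons] at h
      exact congrArg _ (ih _ (by omega))

-- ===== VERDICT (by name: the statement is the Claim_ definition above) =====
theorem take_pairs_spec : Claim_equal_take_pairs := by
  intro xs _ hpre
  show take_pairs xs = take_pairs_alt xs
  rw [take_pairs_alt, if_neg (by simp [Pre_take_pairs] at hpre; omega)]
  exact go_eq_zip xs none hpre
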